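-- pv_equiv track=rewrite | github.com/agarasia/DSA | Heaps/Learning/Converting a Min Heap into Max Heap.py | convertToMaxHeap
-- ===== SOURCE A (Python) =====
-- def convertToMaxHeap(nums):
--     def heapifyDown(i):
--         largest = i
--         left = 2 * i + 1
--         right = 2 * i + 2
--
--         if left < len(nums) and nums[left] > nums[largest]:
--             largest = left
--
--         if right < len(nums) and nums[right] > nums[largest]:
--             largest = right
--
--         if largest != i:
--             nums[i], nums[largest] = nums[largest], nums[i]
--             heapifyDown(largest)
--
--     # Perform heapify starting from the last non-leaf node to the root node
--     for i in range(len(nums) // 2 - 1, -1, -1):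
--         heapifyDown(i)
--
--     return nums
-- ===== SOURCE B (Python) =====
-- def convertToMaxHeap(nums):
--     n = len(nums)
--     for start in range(n // 2 - 1, -1, -1):
--         v = nums[start]
--         j = start
--         while True:
--             largest = j
--             big = v
--             left = 2 * j + 1
--             right = 2 * j + 2
--             if left < n and nums[left] > big:
--                 largest = left
--                 big = nums[left]
--             if right < n and nums[right] > big:
--                 largest = right
--                 big = nums[right]
--             if largest == j:
--                 break
--             nums[j] = big
--             j = largest
--         nums[j] = v
--     return nums
-- ===== Notes on version B (the rewrite author's own statement) =====
-- stated objective: alternative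
-- what changed: Replaces A's recursive swap-based heapifyDown with an iterative hole-style sift-down that carries the sifted value, shifts the larger child up with one write per level, and writes the value once at its final position (same comparison order and final array, two writes per level reduced to one plus a final write).
import Mathlib
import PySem

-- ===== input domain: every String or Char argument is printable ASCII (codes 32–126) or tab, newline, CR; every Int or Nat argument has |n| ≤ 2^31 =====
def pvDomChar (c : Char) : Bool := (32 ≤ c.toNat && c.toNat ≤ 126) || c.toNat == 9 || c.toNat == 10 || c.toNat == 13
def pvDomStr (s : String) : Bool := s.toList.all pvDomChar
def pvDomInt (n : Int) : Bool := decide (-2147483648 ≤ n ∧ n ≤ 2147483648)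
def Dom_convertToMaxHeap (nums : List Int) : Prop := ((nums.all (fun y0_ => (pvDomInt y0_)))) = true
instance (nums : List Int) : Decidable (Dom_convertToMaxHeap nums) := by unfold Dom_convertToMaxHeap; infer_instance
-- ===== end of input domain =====

-- B replaces A's recursive swap-based heapifyDown by an iterative "hole" sift-down that
-- shifts the larger child up and writes the sifted value once at the end (same swap path,
-- one array write per level instead of two); return value proved equal, both mutate in Python.

-- ===== PORT A =====
-- the final value of A's local 'largest' after the two comparisons (nums[x] > nums[y] ported as getD)
def heapLargestA (nums : List Int) (i : Nat) : Nat :=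
  if 2 * i + 1 < nums.length ∧ nums.getD i 0 < nums.getD (2 * i + 1) 0 then
    (if 2 * i + 2 < nums.length ∧ nums.getD (2 * i + 1) 0 < nums.getD (2 * i + 2) 0 then 2 * i + 2 else 2 * i + 1)
  else
    (if 2 * i + 2 < nums.length ∧ nums.getD i 0 < nums.getD (2 * i + 2) 0 then 2 * i + 2 else i)

lemma heapLargestA_bounds (nums : List Int) (i : Nat) (h : heapLargestA nums i ≠ i) :
    i < heapLargestA nums i ∧ heapLargestA nums i < nums.length := by
  unfold heapLargestA at h ⊢
  split_ifs at h ⊢ <;> omega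

-- A's heapifyDown: compare, swap, recurse
def heapifyDownA (nums : List Int) (i : Nat) : List Int :=
  if h : heapLargestA nums i = i then nums
  else
    heapifyDownA
      ((nums.set i (nums.getD (heapLargestA nums i) 0)).set (heapLargestA nums i) (nums.getD i 0))
      (heapLargestA nums i)
termination_by nums.length - i
decreasing_by
  have hb := heapLargestA_bounds nums i h
  simp only [List.length_set]
  omega

-- A's loop: for i in range(len(nums)//2 - 1, -1, -1)
def convertToMaxHeap (nums : List Int) : List Int :=
  (PySem.List.pyRange (PySem.Int.floordiv (nums.length : Int) 2 - 1) (-1) (-1)).foldl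
    (fun a i => heapifyDownA a i.toNat) nums

-- ===== PORT B =====
-- B's 'largest' after the two comparisons (carrying the sifted value v instead of reading a[j])
def goLargest (a : List Int) (j : Nat) (v : Int) : Nat :=
  if 2 * j + 1 < a.length ∧ v < a.getD (2 * j + 1) 0 then
    (if 2 * j + 2 < a.length ∧ a.getD (2 * j + 1) 0 < a.getD (2 * j + 2) 0 then 2 * j + 2 else 2 * j + 1)
  else
    (if 2 * j + 2 < a.length ∧ v < a.getD (2 * j + 2) 0 then 2 * j + 2 else j)

-- B's 'big' (the larger child's value, or v)
def goBig (a : List Int) (j : Nat) (v : Int) : Int :=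
  if 2 * j + 1 < a.length ∧ v < a.getD (2 * j + 1) 0 then
    (if 2 * j + 2 < a.length ∧ a.getD (2 * j + 1) 0 < a.getD (2 * j + 2) 0 then a.getD (2 * j + 2) 0 else a.getD (2 * j + 1) 0)
  else
    (if 2 * j + 2 < a.length ∧ v < a.getD (2 * j + 2) 0 then a.getD (2 * j + 2) 0 else v)

lemma goLargest_bounds (a : List Int) (j : Nat) (v : Int) (h : goLargest a j v ≠ j) :
    j < goLargest a j v ∧ goLargest a j v < a.length := by
  unfold goLargest at h ⊢
  split_ifs at h ⊢ <;> omega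

-- B's while loop: shift the larger child up, then write v at the final hole
def goB (a : List Int) (j : Nat) (v : Int) : List Int :=
  if h : goLargest a j v = j then a.set j v
  else goB (a.set j (goBig a j v)) (goLargest a j v) v
termination_by a.length - j
decreasing_by
  have hb := goLargest_bounds a j v h
  simp only [List.length_set]
  omega

-- B's loop (n = len(nums) is computed once in Source B; the length is invariant under set, so a.length is the same value)
def convertToMaxHeap_alt (nums : List Int) : List Int :=
  (PySem.List.pyRange (PySem.Int.floordiv (nums.length : Int) 2 - 1) (-1) (-1)).foldl
    (fun a s => goB a s.toNat (a.getD s.toNat 0)) nums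

-- ===== PRECONDITION & SPEC =====
def Spec_convertToMaxHeap (nums : List Int) (out : List Int) : Prop := out = convertToMaxHeap_alt nums
instance (nums : List Int) (out : List Int) : Decidable (Spec_convertToMaxHeap nums out) := by unfold Spec_convertToMaxHeap; infer_instance

-- ===== CLAIM (what is proved, stated in full; the proofs are below) =====
def Claim_equal_convertToMaxHeap : Prop := ∀ (nums : List Int), Dom_convertToMaxHeap nums → Spec_convertToMaxHeap nums (convertToMaxHeap nums)

-- ===== LEMMAS AND PROOFS =====

lemma getD_set_ne (l : List Int) {i j : Nat} (x : Int) (h : i ≠ j) :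
    (l.set i x).getD j 0 = l.getD j 0 := by
  simp [List.getD_eq_getElem?_getD, List.getElem?_set_ne h]

lemma getD_set_self (l : List Int) {i : Nat} (x : Int) (h : i < l.length) :
    (l.set i x).getD i 0 = x := by
  simp [List.getD_eq_getElem?_getD, h]

lemma set_getD_self (l : List Int) (j : Nat) : l.set j (l.getD j 0) = l := by
  induction l generalizing j with
  | nil => simp
  | cons x xs ih =>
    cases j with
    | zero => rfl
    | succ n =>
      simp only [List.getD_cons_succ, List.set_cons_succ]
      rw [ih]

lemma heapLargestA_set (a : List Int) (j : Nat) (v : Int) :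
    heapLargestA (a.set j v) j = goLargest a j v := by
  unfold heapLargestA goLargest
  by_cases hj : j < a.length
  · rw [List.length_set, getD_set_ne a v (show j ≠ 2 * j + 1 by omega),
        getD_set_ne a v (show j ≠ 2 * j + 2 by omega), getD_set_self a v hj]
  · simp only [List.length_set]
    split_ifs <;> omega

lemma goBig_eq (a : List Int) (j : Nat) (v : Int) (h : goLargest a j v ≠ j) :
    a.getD (goLargest a j v) 0 = goBig a j v := by
  unfold goLargest at h ⊢
  unfold goBig
  split_ifs at h ⊢ <;> first | rfl | exact absurd rfl h

lemma goB_eq_heapifyDownA (a : List Int) (j : Nat) (v : Int) :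
    goB a j v = heapifyDownA (a.set j v) j := by
  induction a, j using goB.induct (v := v) with
  | case1 a j h =>
    rw [goB, dif_pos h, heapifyDownA, dif_pos (by rw [heapLargestA_set]; exact h)]
  | case2 a j h ih =>
    have hL : heapLargestA (a.set j v) j = goLargest a j v := heapLargestA_set a j v
    have hb := goLargest_bounds a j v h
    rw [goB, dif_neg h, ih]
    conv_rhs => rw [heapifyDownA, dif_neg (show ¬heapLargestA (a.set j v) j = j by rw [hL]; exact h)]
    rw [hL, getD_set_ne a v (show j ≠ goLargest a j v by omega), goBig_eq a j v h,
        getD_set_self a v (by omega), List.set_set]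

lemma step_eq (a : List Int) (j : Nat) :
    goB a j (a.getD j 0) = heapifyDownA a j := by
  rw [goB_eq_heapifyDownA, set_getD_self]

-- ===== VERDICT (by name: the statement is the Claim_ definition above) =====
theorem convertToMaxHeap_spec : Claim_equal_convertToMaxHeap := by
  intro nums _
  unfold Spec_convertToMaxHeap convertToMaxHeap convertToMaxHeap_alt
  congr 1
  funext a i
  exact (step_eq a i.toNat).symm
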